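-- pv_equiv track=rewrite | github.com/ayushman-25/Codechef-Submissions | SUBINC.py | findCnt
-- ===== SOURCE A (Python) =====
-- def findCnt(arr, n, k) :
--     ret = 0;
--     i = 0;
--     while (i < n) :
--         j = i + 1;
--         while (j < n and arr[j] >= arr[j - 1]) :
--             j += 1;
--         x = max(0, j - i - k);
--         ret += (x * (x + 1)) / 2;
--         i = j;
--     return int(ret)
-- ===== SOURCE B (Python) =====
-- def findCnt(arr, n, k):
--     # One flat pass: `run` = length of the non-decreasing run ending at i;
--     # each position contributes the number of qualifying subarrays ending there.
--     total = 0
--     run = 0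
--     for i in range(n):
--         run = run + 1 if i > 0 and arr[i] >= arr[i - 1] else 1
--         total += min(run, max(0, run - k))
--     return total
-- ===== Notes on version B (the rewrite author's own statement) =====
-- stated objective: simpler
-- what changed: Replaces A's nested while-loops (find each run boundary, add a per-run closed form x(x+1)/2 accumulated in floats) by one flat exact-integer loop that maintains the length of the current non-decreasing run and adds the per-position count of qualifying subarrays ending there.
-- intended difference: For k < 0 (where A's closed form x = j-i-k also counts phantom subarrays of non-positive length, e.g. A returns 3 on ([5],1,-1)) and for n > 2^26 (where A's float accumulation of x(x+1)/2 can round), A's value is an artefact of its float closed form, while B returns the exact count of nonempty non-decreasing subarrays of length > k, the intended value (1 on that witness). — e.g. on findCnt([5], 1, -1): A returns 3, B returns 1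
import Mathlib
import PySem

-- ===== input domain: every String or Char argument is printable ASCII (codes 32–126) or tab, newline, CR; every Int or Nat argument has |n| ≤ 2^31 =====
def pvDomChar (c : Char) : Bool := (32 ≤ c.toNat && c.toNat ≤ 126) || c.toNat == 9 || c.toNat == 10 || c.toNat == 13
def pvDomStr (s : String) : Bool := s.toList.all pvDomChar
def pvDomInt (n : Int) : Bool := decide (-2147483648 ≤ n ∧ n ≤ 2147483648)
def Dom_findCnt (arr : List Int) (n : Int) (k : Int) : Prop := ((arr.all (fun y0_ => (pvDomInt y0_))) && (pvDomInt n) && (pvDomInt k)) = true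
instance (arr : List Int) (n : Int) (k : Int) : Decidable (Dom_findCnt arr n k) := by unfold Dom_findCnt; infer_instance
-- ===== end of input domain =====

-- B replaces A's nested while-loops and float-accumulated per-run closed form by one flat
-- exact-integer loop adding, per position, the number of qualifying subarrays ending there
-- (simpler); where A's float closed form counts phantom subarrays (k < 0) or can round
-- (n > 2^26), B returns the exact intended count — see D_ below.

-- ===== PORT A =====
-- A accumulates 'ret' in Python FLOATS: every value that arises is a non-negative
-- integer (x*(x+1) is even, so the true quotient of the float division is an integer,
-- and each float addition adds two integer-valued doubles), so each float operation is
-- exactly 'round this integer to the nearest double, ties to even mantissa'.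
-- roundDouble is that rounding, exact for 0 ≤ v < 2^1024 (far above anything A reaches):
-- integers below 2^53 are exactly representable; above, the mantissa is cut to 53 bits.
def roundDouble (v : Int) : Int :=
  if v < 9007199254740992 then v
  else
    let e := v.toNat.log2 - 52
    let p : Int := (2 : Int) ^ e
    let q := v.ediv p
    let r := v.emod p
    if 2 * r > p ∨ (2 * r = p ∧ q.emod 2 = 1) then (q + 1) * p else q * p

-- inner 'while (j < n and arr[j] >= arr[j - 1]): j += 1'; the Nat fuel only makes the loop
-- total (each step needs j < n, so fuel ≥ (n - j).toNat never runs out); indices are in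
-- range under Pre_.
def findCntInner (arr : List Int) (n : Int) (fuel : Nat) (j : Int) : Int :=
  match fuel with
  | 0 => j
  | f + 1 =>
    if j < n ∧ PySem.List.pyGetD arr (j - 1) 0 ≤ PySem.List.pyGetD arr j 0 then
      findCntInner arr n f (j + 1)
    else j

-- outer 'while (i < n)' (fuel: i advances to j ≥ i + 1 each iteration, so n.toNat suffices);
-- 'ret += (x*(x+1))/2' is float: term = nearest double to the integer x*(x+1)/2
-- (PySem.Int.floordiv is exact since x*(x+1) is even), then ret = nearest double to the
-- integer ret + term; the final 'int(ret)' is the identity on the integer-valued ret.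
def findCntLoop (arr : List Int) (n : Int) (k : Int) (fuel : Nat) (i : Int) (ret : Int) : Int :=
  match fuel with
  | 0 => ret
  | f + 1 =>
    if i < n then
      let j := findCntInner arr n (n - (i + 1)).toNat (i + 1)
      let x := max 0 (j - i - k)
      findCntLoop arr n k f j
        (roundDouble (ret + roundDouble (PySem.Int.floordiv (x * (x + 1)) 2)))
    else ret

def findCnt (arr : List Int) (n : Int) (k : Int) : Int := findCntLoop arr n k n.toNat 0 0

-- ===== PORT B =====
-- loop body of Source B: run = run+1 if i>0 and arr[i]>=arr[i-1] else 1; total += min(run, max(0, run-k))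
def findCntAltStep (arr : List Int) (k : Int) (st : Int × Int) (i : Int) : Int × Int :=
  let run := if 0 < i ∧ PySem.List.pyGetD arr (i - 1) 0 ≤ PySem.List.pyGetD arr i 0 then st.2 + 1 else 1
  (st.1 + min run (max 0 (run - k)), run)

def findCnt_alt (arr : List Int) (n : Int) (k : Int) : Int :=
  ((PySem.List.pyRange 0 n 1).foldl (findCntAltStep arr k) (0, 0)).1

-- ===== PRECONDITION & SPEC =====
-- Pre_ excludes exactly the inputs on which A raises IndexError: n > len(arr), except the
-- degenerate arr = [], n = 1 corner, where the inner guard short-circuits and A returns.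
def Pre_findCnt (arr : List Int) (n : Int) (k : Int) : Prop :=
  n ≤ (arr.length : Int) ∨ (arr = [] ∧ n = 1)
instance (arr : List Int) (n : Int) (k : Int) : Decidable (Pre_findCnt arr n k) := by
  unfold Pre_findCnt; infer_instance

def pvWitness_findCnt : List Int × Int × Int := ([1, 2, 1], 3, 1)

-- For k < 0, A's closed form x = j-i-k also counts phantom subarrays of non-positive length
-- (and its float term rounds for large |k|); for n > 2^26, A's float accumulation of
-- x(x+1)/2 can round; in both cases B returns the exact count of nonempty non-decreasing
-- subarrays of length > k, the intended value.
def D_findCnt (arr : List Int) (n : Int) (k : Int) : Prop :=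
  1 ≤ n ∧ (k < 0 ∨ 67108864 < n)
instance (arr : List Int) (n : Int) (k : Int) : Decidable (D_findCnt arr n k) := by
  unfold D_findCnt; infer_instance

def Spec_findCnt (arr : List Int) (n : Int) (k : Int) (out : Int) : Prop :=
  ¬ D_findCnt arr n k → out = findCnt_alt arr n k
instance (arr : List Int) (n : Int) (k : Int) (out : Int) : Decidable (Spec_findCnt arr n k out) := by
  unfold Spec_findCnt; infer_instance

def pvDiffWitness_findCnt : List Int × Int × Int := ([5], 1, -1)
def pvDiffWitnessOut_findCnt : Int × Int := (3, 1)

-- ===== CLAIM (what is proved, stated in full; the proofs are below) =====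
def Claim_unchanged_findCnt : Prop := ∀ (arr : List Int) (n : Int) (k : Int), Dom_findCnt arr n k → Pre_findCnt arr n k → Spec_findCnt arr n k (findCnt arr n k)
def Claim_changed_findCnt : Prop := Dom_findCnt (pvDiffWitness_findCnt.1) (pvDiffWitness_findCnt.2.1) (pvDiffWitness_findCnt.2.2) ∧ Pre_findCnt (pvDiffWitness_findCnt.1) (pvDiffWitness_findCnt.2.1) (pvDiffWitness_findCnt.2.2) ∧ D_findCnt (pvDiffWitness_findCnt.1) (pvDiffWitness_findCnt.2.1) (pvDiffWitness_findCnt.2.2) ∧ findCnt (pvDiffWitness_findCnt.1) (pvDiffWitness_findCnt.2.1) (pvDiffWitness_findCnt.2.2) = pvDiffWitnessOut_findCnt.1 ∧ findCnt_alt (pvDiffWitness_findCnt.1) (pvDiffWitness_findCnt.2.1) (pvDiffWitness_findCnt.2.2) = pvDiffWitnessOut_findCnt.2 ∧ pvDiffWitnessOut_findCnt.1 ≠ pvDiffWitnessOut_findCnt.2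

-- ===== LEMMAS AND PROOFS =====

-- rounding is the identity on the exactly representable integers
theorem roundDouble_id (v : Int) (h : v < 9007199254740992) : roundDouble v = v := by
  unfold roundDouble; rw [if_pos h]

-- A's outer loop with EXACT integer arithmetic (proof-side twin of findCntLoop)
def findCntLoopX (arr : List Int) (n : Int) (k : Int) (fuel : Nat) (i : Int) (ret : Int) : Int :=
  match fuel with
  | 0 => ret
  | f + 1 =>
    if i < n then
      let j := findCntInner arr n (n - (i + 1)).toNat (i + 1)
      let x := max 0 (j - i - k)
      findCntLoopX arr n k f j (ret + PySem.Int.floordiv (x * (x + 1)) 2)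
    else ret

-- B's fold restarted at position p with current run length r and accumulator acc
def bSeg (arr : List Int) (n k p r acc : Int) : Int :=
  ((PySem.List.pyRange p n 1).foldl (findCntAltStep arr k) (acc, r)).1

-- the per-run closed form A adds for a run of length t (as an exact integer)
def gfun (k t : Int) : Int :=
  PySem.Int.floordiv ((max 0 (t - k)) * (max 0 (t - k) + 1)) 2

theorem gfun_zero (k : Int) (hk : 0 ≤ k) : gfun k 0 = 0 := by
  unfold gfun
  have h : max 0 (0 - k) = 0 := by omega
  rw [h]; simp [PySem.Int.floordiv]

theorem gfun_step (k r : Int) :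
    gfun k (r + 1) = gfun k r + max 0 (r + 1 - k) := by
  unfold gfun
  by_cases h : r + 1 ≤ k
  · have h1 : max 0 (r + 1 - k) = 0 := by omega
    have h2 : max 0 (r - k) = 0 := by omega
    rw [h1, h2]; simp [PySem.Int.floordiv]
  · have h1 : max 0 (r + 1 - k) = r + 1 - k := by omega
    have h2 : max 0 (r - k) = r - k := by omega
    rw [h1, h2, PySem.Int.floordiv_eq_ediv_of_pos (show (0:Int) < 2 by norm_num),
        PySem.Int.floordiv_eq_ediv_of_pos (show (0:Int) < 2 by norm_num)]
    have h3 : (r + 1 - k) * (r + 1 - k + 1) = (r - k) * (r - k + 1) + (r + 1 - k) * 2 := by ring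
    rw [h3, Int.add_mul_ediv_right _ _ (by norm_num)]

theorem bSeg_stop (arr : List Int) (n k p r acc : Int) (h : n ≤ p) :
    bSeg arr n k p r acc = acc := by
  unfold bSeg
  rw [PySem.List.pyRange_one]
  have : (n - p).toNat = 0 := by omega
  rw [this]; simp

theorem bSeg_cons (arr : List Int) (n k p r acc : Int) (h : p < n) :
    bSeg arr n k p r acc =
      bSeg arr n k (p + 1)
        (if 0 < p ∧ PySem.List.pyGetD arr (p - 1) 0 ≤ PySem.List.pyGetD arr p 0 then r + 1 else 1)
        (acc + (let run := if 0 < p ∧ PySem.List.pyGetD arr (p - 1) 0 ≤ PySem.List.pyGetD arr p 0 then r + 1 else 1;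
                min run (max 0 (run - k)))) := by
  unfold bSeg
  rw [PySem.List.pyRange_one_cons h]
  rfl

theorem findCntInner_ge (arr : List Int) (n : Int) :
    ∀ (fuel : Nat) (j : Int), j ≤ findCntInner arr n fuel j := by
  intro fuel
  induction fuel with
  | zero => intro j; simp [findCntInner]
  | succ f ih =>
    intro j
    rw [findCntInner]
    split
    · have := ih (j + 1); omega
    · omega

theorem findCntInner_le (arr : List Int) (n : Int) :
    ∀ (fuel : Nat) (j : Int), j ≤ n → findCntInner arr n fuel j ≤ n := by
  intro fuel
  induction fuel with
  | zero => intro j hj; simpa [findCntInner] using hj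
  | succ f ih =>
    intro j hj
    rw [findCntInner]
    split
    · next h => exact ih (j + 1) (by omega)
    · exact hj

-- with enough fuel the inner loop ends at a stop position (run end or j ≥ n)
theorem findCntInner_stop (arr : List Int) (n : Int) :
    ∀ (fuel : Nat) (j : Int), (n - j).toNat ≤ fuel →
      ¬ (findCntInner arr n fuel j < n ∧
         PySem.List.pyGetD arr (findCntInner arr n fuel j - 1) 0 ≤ PySem.List.pyGetD arr (findCntInner arr n fuel j) 0) := by
  intro fuel
  induction fuel with
  | zero =>
    intro j hf
    simp only [findCntInner]
    intro hc; omega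
  | succ f ih =>
    intro j hf
    rw [findCntInner]
    split
    · next h => exact ih (j + 1) (by omega)
    · next h => exact h

-- the float loop computes the exact integer loop while every intermediate value
-- stays strictly below 2^53 (k ≥ 0 keeps each run's term ≤ its squared length)
theorem loopF_eq_loopX (arr : List Int) (n k : Int) (hk : 0 ≤ k) :
    ∀ (fuel : Nat) (i acc : Int), 0 ≤ acc →
      2 * acc + (n - i) * (n - i + 1) < 18014398509481984 →
      findCntLoop arr n k fuel i acc = findCntLoopX arr n k fuel i acc := by
  intro fuel
  induction fuel with
  | zero => intro i acc _ _; rfl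
  | succ f ih =>
    intro i acc hacc hb
    rw [findCntLoop, findCntLoopX]
    split
    · next hin =>
      have hge := findCntInner_ge arr n (n - (i + 1)).toNat (i + 1)
      have hle := findCntInner_le arr n (n - (i + 1)).toNat (i + 1) (by omega)
      set j := findCntInner arr n (n - (i + 1)).toNat (i + 1) with hjdef
      set x := max 0 (j - i - k) with hxdef
      have hx0 : 0 ≤ x := by omega
      have hxle : x ≤ j - i := by omega
      have hq2 : PySem.Int.floordiv (x * (x + 1)) 2 * 2 = x * (x + 1) := by
        rw [PySem.Int.floordiv_eq_ediv_of_pos (show (0:Int) < 2 by norm_num)]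
        exact Int.ediv_mul_cancel (Int.even_mul_succ_self x).two_dvd
      set q := PySem.Int.floordiv (x * (x + 1)) 2 with hqdef
      have hq0 : 0 ≤ q := by nlinarith
      have hqbound : 2 * q ≤ (n - i) * (n - i + 1) := by nlinarith
      have hq53 : q < 9007199254740992 := by nlinarith
      have hsum53 : acc + q < 9007199254740992 := by nlinarith
      refine Eq.trans ?_ (ih j (acc + q) (by omega) (by nlinarith))
      show findCntLoop arr n k f j (roundDouble (acc + roundDouble q)) = findCntLoop arr n k f j (acc + q)
      rw [roundDouble_id q hq53, roundDouble_id (acc + q) hsum53]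
    · rfl

-- bridge along the inner while loop: from mid-run position p with run length r,
-- B's fold reaches the run's end j = findCntInner … p having added g(r + (j-p)) - g(r)
theorem inner_bridge (arr : List Int) (n k : Int) (hk : 0 ≤ k) :
    ∀ (fuel : Nat) (p r acc : Int), (n - p).toNat ≤ fuel → 1 ≤ p → 0 ≤ r →
      bSeg arr n k p r acc =
        bSeg arr n k (findCntInner arr n fuel p) (r + (findCntInner arr n fuel p - p))
          (acc + (gfun k (r + (findCntInner arr n fuel p - p)) - gfun k r)) := by
  intro fuel
  induction fuel with
  | zero =>
    intro p r acc hf hp hr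
    simp only [findCntInner]
    rw [show r + (p - p) = r from by omega,
        show acc + (gfun k r - gfun k r) = acc from by omega]
  | succ f ih =>
    intro p r acc hf hp hr
    rw [findCntInner]
    split
    · next h =>
      have hstep : bSeg arr n k p r acc = bSeg arr n k (p + 1) (r + 1) (acc + max 0 (r + 1 - k)) := by
        rw [bSeg_cons arr n k p r acc h.1]
        have hcond : (0 < p ∧ PySem.List.pyGetD arr (p - 1) 0 ≤ PySem.List.pyGetD arr p 0) := ⟨by omega, h.2⟩
        rw [if_pos hcond]
        have : min (r + 1) (max 0 (r + 1 - k)) = max 0 (r + 1 - k) := by omega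
        rw [this]
      rw [hstep, ih (p + 1) (r + 1) _ (by omega) (by omega) (by omega)]
      have hge := findCntInner_ge arr n f (p + 1)
      have harith : r + 1 + (findCntInner arr n f (p + 1) - (p + 1)) = r + (findCntInner arr n f (p + 1) - p) := by omega
      rw [harith]
      have hgs := gfun_step k r
      have : acc + max 0 (r + 1 - k) + (gfun k (r + (findCntInner arr n f (p + 1) - p)) - gfun k (r + 1))
           = acc + (gfun k (r + (findCntInner arr n f (p + 1) - p)) - gfun k r) := by omega
      rw [this]
    · next h =>
      rw [show r + (p - p) = r from by omega,
          show acc + (gfun k r - gfun k r) = acc from by omega]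

-- main loop correspondence: from a run boundary i (or i ≥ n), A's exact loop and
-- B's fold (with ANY carried run length r) agree
theorem loop_eq_bSeg (arr : List Int) (n k : Int) (hk : 0 ≤ k) :
    ∀ (fuel : Nat) (i acc r : Int), (n - i).toNat ≤ fuel → 0 ≤ i →
      (i = 0 ∨ ¬ PySem.List.pyGetD arr (i - 1) 0 ≤ PySem.List.pyGetD arr i 0) →
      findCntLoopX arr n k fuel i acc = bSeg arr n k i r acc := by
  intro fuel
  induction fuel with
  | zero =>
    intro i acc r hf hi _
    simp only [findCntLoopX]
    rw [bSeg_stop _ _ _ _ _ _ (by omega)]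
  | succ f ih =>
    intro i acc r hf hi hb
    rw [findCntLoopX]
    split
    · next hin =>
      have hge := findCntInner_ge arr n (n - (i + 1)).toNat (i + 1)
      set j := findCntInner arr n (n - (i + 1)).toNat (i + 1) with hjdef
      have hbstep : bSeg arr n k i r acc = bSeg arr n k (i + 1) 1 (acc + max 0 (1 - k)) := by
        rw [bSeg_cons arr n k i r acc hin]
        have hcond : ¬ (0 < i ∧ PySem.List.pyGetD arr (i - 1) 0 ≤ PySem.List.pyGetD arr i 0) := by
          rcases hb with h0 | hlt
          · omega
          · intro hc; exact hlt hc.2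
        rw [if_neg hcond]
        have : min 1 (max 0 (1 - k)) = max 0 (1 - k) := by omega
        rw [this]
      have hbridge := inner_bridge arr n k hk (n - (i + 1)).toNat (i + 1) 1
        (acc + max 0 (1 - k)) (by omega) (by omega) (by omega)
      rw [hbstep, hbridge, ← hjdef]
      have harith : (1 : Int) + (j - (i + 1)) = j - i := by omega
      rw [harith]
      have hg1 : gfun k 1 = max 0 (1 - k) := by
        have := gfun_step k 0
        have h0 := gfun_zero k hk
        simp only [zero_add] at this
        omega
      have hacc : acc + max 0 (1 - k) + (gfun k (j - i) - gfun k 1) = acc + gfun k (j - i) := by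
        omega
      rw [hacc]
      have hterm : max 0 (j - i - k) * (max 0 (j - i - k) + 1) = max 0 ((j - i) - k) * (max 0 ((j - i) - k) + 1) := by
        ring_nf
      show findCntLoopX arr n k f j (acc + PySem.Int.floordiv (max 0 (j - i - k) * (max 0 (j - i - k) + 1)) 2)
         = bSeg arr n k j (j - i) (acc + gfun k (j - i))
      rw [show PySem.Int.floordiv (max 0 (j - i - k) * (max 0 (j - i - k) + 1)) 2 = gfun k (j - i) from by
        unfold gfun; rw [hterm]]
      have hstop := findCntInner_stop arr n (n - (i + 1)).toNat (i + 1) (by omega)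
      rw [← hjdef] at hstop
      by_cases hjn : j < n
      · have hbnd : (j = 0 ∨ ¬ PySem.List.pyGetD arr (j - 1) 0 ≤ PySem.List.pyGetD arr j 0) := by
          right; intro hc; exact hstop ⟨hjn, hc⟩
        exact ih j _ (j - i) (by omega) (by omega) hbnd
      · rw [findCntLoopX.eq_def]
        cases f with
        | zero => rw [bSeg_stop _ _ _ _ _ _ (by omega)]
        | succ f' =>
          simp only []
          rw [if_neg hjn, bSeg_stop _ _ _ _ _ _ (by omega)]
    · next hnin =>
      rw [bSeg_stop _ _ _ _ _ _ (by omega)]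

-- ===== VERDICT =====

theorem findCnt_spec : Claim_unchanged_findCnt := by
  intro arr n k _ _ hnd
  unfold findCnt findCnt_alt
  by_cases hn : n ≤ 0
  · have hfz : n.toNat = 0 := by omega
    rw [hfz]
    simp only [findCntLoop]
    rw [PySem.List.pyRange_one]
    have : (n - 0).toNat = 0 := by omega
    rw [this]; simp
  · have hnot : ¬ (k < 0 ∨ 67108864 < n) := by
      intro h; exact hnd ⟨by omega, h⟩
    have hk : 0 ≤ k := by omega
    have hn26 : n ≤ 67108864 := by omega
    rw [loopF_eq_loopX arr n k hk n.toNat 0 0 (by omega) (by nlinarith)]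
    exact loop_eq_bSeg arr n k hk n.toNat 0 0 0 (by omega) (by omega) (Or.inl rfl)

theorem findCnt_changed : Claim_changed_findCnt := by
  unfold Claim_changed_findCnt; decide
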